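-- pv_equiv track=rewrite | github.com/idpro1313/slgpu | web/backend/app/services/env_files.py | render_env_text
-- ===== SOURCE A (Python) =====
-- def render_env_text(values: dict[str, str], header: str | None = None) -> str:
--     """Render a dict back into the slgpu preset .env format.
--
--     Order is stable and grouped: identity, runtime, vLLM-only, SGLang-only,
--     everything else. Values containing whitespace are quoted with
--     double quotes; existing quotes are escaped with a backslash.
--     """
--
--     lines: list[str] = []
--     if header:
--         for header_line in header.splitlines():
--             lines.append(f"# {header_line}".rstrip())
--         lines.append("")
--
--     groups: list[tuple[str, list[str]]] = [
--         ("Identity", ["VLLM_DOCKER_IMAGE", "MODEL_ID", "MODEL_REVISION", "SLGPU_SERVED_MODEL_NAME"]),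
--         ("Runtime", ["MAX_MODEL_LEN", "TP", "KV_CACHE_DTYPE", "GPU_MEM_UTIL"]),
--         (
--             "vLLM",
--             [
--                 "SLGPU_MAX_NUM_BATCHED_TOKENS",
--                 "SLGPU_VLLM_MAX_NUM_SEQS",
--                 "SLGPU_VLLM_BLOCK_SIZE",
--                 "SLGPU_DISABLE_CUSTOM_ALL_REDUCE",
--                 "SLGPU_ENABLE_PREFIX_CACHING",
--                 "SLGPU_ENABLE_EXPERT_PARALLEL",
--                 "SLGPU_VLLM_DATA_PARALLEL_SIZE",
--                 "SLGPU_VLLM_ATTENTION_BACKEND",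
--                 "SLGPU_VLLM_TOKENIZER_MODE",
--                 "SLGPU_VLLM_COMPILATION_CONFIG",
--                 "SLGPU_VLLM_ENFORCE_EAGER",
--                 "SLGPU_VLLM_SPECULATIVE_CONFIG",
--                 "MM_ENCODER_TP_MODE",
--                 "TOOL_CALL_PARSER",
--                 "REASONING_PARSER",
--                 "CHAT_TEMPLATE_CONTENT_FORMAT",
--                 "VLLM_MEMORY_PROFILER_ESTIMATE_CUDAGRAPHS",
--             ],
--         ),
--         (
--             "SGLang",
--             [
--                 "SGLANG_MEM_FRACTION_STATIC",
--                 "SGLANG_CUDA_GRAPH_MAX_BS",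
--                 "SGLANG_ENABLE_TORCH_COMPILE",
--                 "SGLANG_DISABLE_CUDA_GRAPH",
--                 "SGLANG_DISABLE_CUSTOM_ALL_REDUCE",
--             ],
--         ),
--         ("Bench", ["BENCH_MODEL_NAME"]),
--     ]
--
--     seen: set[str] = set()
--     for title, keys in groups:
--         present = [(k, values[k]) for k in keys if k in values and values[k] != ""]
--         if not present:
--             continue
--         lines.append(f"# --- {title} ---")
--         for key, value in present:
--             lines.append(_render_pair(key, value))
--             seen.add(key)
--         lines.append("")
--
--     extras = sorted(k for k in values if k not in seen and values[k] != "")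
--     if extras:
--         lines.append("# --- Extra ---")
--         for key in extras:
--             lines.append(_render_pair(key, values[key]))
--         lines.append("")
--
--     return "\n".join(lines).rstrip() + "\n"
--
-- def _render_pair(key: str, value: str) -> str:
--     if value == "":
--         return f"{key}="
--     needs_quote = any(ch.isspace() for ch in value) or "#" in value
--     if needs_quote:
--         escaped = value.replace('"', '\\"')
--         return f'{key}="{escaped}"'
--     return f"{key}={value}"
-- ===== SOURCE B (Python) =====
-- _GROUPS = [
--     ("Identity", ["VLLM_DOCKER_IMAGE", "MODEL_ID", "MODEL_REVISION", "SLGPU_SERVED_MODEL_NAME"]),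
--     ("Runtime", ["MAX_MODEL_LEN", "TP", "KV_CACHE_DTYPE", "GPU_MEM_UTIL"]),
--     (
--         "vLLM",
--         [
--             "SLGPU_MAX_NUM_BATCHED_TOKENS",
--             "SLGPU_VLLM_MAX_NUM_SEQS",
--             "SLGPU_VLLM_BLOCK_SIZE",
--             "SLGPU_DISABLE_CUSTOM_ALL_REDUCE",
--             "SLGPU_ENABLE_PREFIX_CACHING",
--             "SLGPU_ENABLE_EXPERT_PARALLEL",
--             "SLGPU_VLLM_DATA_PARALLEL_SIZE",
--             "SLGPU_VLLM_ATTENTION_BACKEND",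
--             "SLGPU_VLLM_TOKENIZER_MODE",
--             "SLGPU_VLLM_COMPILATION_CONFIG",
--             "SLGPU_VLLM_ENFORCE_EAGER",
--             "SLGPU_VLLM_SPECULATIVE_CONFIG",
--             "MM_ENCODER_TP_MODE",
--             "TOOL_CALL_PARSER",
--             "REASONING_PARSER",
--             "CHAT_TEMPLATE_CONTENT_FORMAT",
--             "VLLM_MEMORY_PROFILER_ESTIMATE_CUDAGRAPHS",
--         ],
--     ),
--     (
--         "SGLang",
--         [
--             "SGLANG_MEM_FRACTION_STATIC",
--             "SGLANG_CUDA_GRAPH_MAX_BS",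
--             "SGLANG_ENABLE_TORCH_COMPILE",
--             "SGLANG_DISABLE_CUDA_GRAPH",
--             "SGLANG_DISABLE_CUSTOM_ALL_REDUCE",
--         ],
--     ),
--     ("Bench", ["BENCH_MODEL_NAME"]),
-- ]
--
-- # one rank per known key: group_index * 1000 + position inside the group
-- _RANK = {k: gi * 1000 + pos for gi, (_t, keys) in enumerate(_GROUPS) for pos, k in enumerate(keys)}
-- _EXTRA_RANK = len(_GROUPS) * 1000  # unknown keys sort after every group
-- _TITLES = [t for t, _k in _GROUPS] + ["Extra"]
--
--
-- def _render_pair(key: str, value: str) -> str: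
--     if value == "":
--         return f"{key}="
--     needs_quote = any(ch.isspace() for ch in value) or "#" in value
--     if needs_quote:
--         escaped = value.replace('"', '\\"')
--         return f'{key}="{escaped}"'
--     return f"{key}={value}"
--
--
-- def render_env_text(values: dict[str, str], header: str | None = None) -> str:
--     out: list[str] = []
--     if header:
--         for header_line in header.splitlines():
--             out.append(f"# {header_line}".rstrip())
--         out.append("")
--
--     entries = sorted(
--         ((k, v) for k, v in values.items() if v != ""),
--         key=lambda kv: (_RANK.get(kv[0], _EXTRA_RANK), kv[0]),
--     )
--
--     prev = -1
--     for k, v in entries: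
--         gi = _RANK.get(k, _EXTRA_RANK) // 1000
--         if gi != prev:
--             if prev >= 0:
--                 out.append("")
--             out.append(f"# --- {_TITLES[gi]} ---")
--             prev = gi
--         out.append(_render_pair(k, v))
--
--     return "\n".join(out).rstrip() + "\n"
-- ===== Notes on version B (the rewrite author's own statement) =====
-- stated objective: alternative
-- what changed: A scans the five group definitions one by one (tracking emitted keys in a 'seen' set) and then sorts the leftovers; B builds one rank table (group_index*1000+position, unknown keys ranked after all groups), sorts all non-empty entries once by (rank, key), and emits titles and blank lines in a single pass whenever the group index changes.
import Mathlib
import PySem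

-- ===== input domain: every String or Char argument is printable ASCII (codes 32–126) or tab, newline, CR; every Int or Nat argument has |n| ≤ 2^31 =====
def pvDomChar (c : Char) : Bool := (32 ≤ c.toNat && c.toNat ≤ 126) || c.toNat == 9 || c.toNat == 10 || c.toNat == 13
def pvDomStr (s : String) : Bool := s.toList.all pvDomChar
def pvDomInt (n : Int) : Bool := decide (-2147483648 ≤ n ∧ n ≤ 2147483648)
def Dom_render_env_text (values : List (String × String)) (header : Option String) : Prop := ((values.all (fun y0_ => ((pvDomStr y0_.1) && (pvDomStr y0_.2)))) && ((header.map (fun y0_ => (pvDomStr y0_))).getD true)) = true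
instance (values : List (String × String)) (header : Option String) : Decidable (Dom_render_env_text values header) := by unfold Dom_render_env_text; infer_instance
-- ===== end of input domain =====

-- B replaces A's per-group scanning (and its 'seen' set) by one rank table and a single
-- sort of all non-empty entries followed by one emission pass (objective: alternative,
-- not faster). Equivalence is about the return value only (neither program mutates).

-- ===== PORT A =====
-- shared module-level table (both Pythons carry the same group table and _render_pair)
def keysIdentity : List String :=
  ["VLLM_DOCKER_IMAGE", "MODEL_ID", "MODEL_REVISION", "SLGPU_SERVED_MODEL_NAME"]
def keysRuntime : List String :=
  ["MAX_MODEL_LEN", "TP", "KV_CACHE_DTYPE", "GPU_MEM_UTIL"]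
def keysVllm : List String :=
  ["SLGPU_MAX_NUM_BATCHED_TOKENS", "SLGPU_VLLM_MAX_NUM_SEQS", "SLGPU_VLLM_BLOCK_SIZE",
   "SLGPU_DISABLE_CUSTOM_ALL_REDUCE", "SLGPU_ENABLE_PREFIX_CACHING",
   "SLGPU_ENABLE_EXPERT_PARALLEL", "SLGPU_VLLM_DATA_PARALLEL_SIZE",
   "SLGPU_VLLM_ATTENTION_BACKEND", "SLGPU_VLLM_TOKENIZER_MODE",
   "SLGPU_VLLM_COMPILATION_CONFIG", "SLGPU_VLLM_ENFORCE_EAGER",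
   "SLGPU_VLLM_SPECULATIVE_CONFIG", "MM_ENCODER_TP_MODE", "TOOL_CALL_PARSER",
   "REASONING_PARSER", "CHAT_TEMPLATE_CONTENT_FORMAT",
   "VLLM_MEMORY_PROFILER_ESTIMATE_CUDAGRAPHS"]
def keysSglang : List String :=
  ["SGLANG_MEM_FRACTION_STATIC", "SGLANG_CUDA_GRAPH_MAX_BS",
   "SGLANG_ENABLE_TORCH_COMPILE", "SGLANG_DISABLE_CUDA_GRAPH",
   "SGLANG_DISABLE_CUSTOM_ALL_REDUCE"]
def keysBench : List String := ["BENCH_MODEL_NAME"]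

def envGroups : List (String × List String) :=
  [("Identity", keysIdentity), ("Runtime", keysRuntime), ("vLLM", keysVllm),
   ("SGLang", keysSglang), ("Bench", keysBench)]

-- _render_pair (identical helper in both Pythons)
def renderPair (key value : String) : String :=
  if value = "" then key ++ "="
  else
    let needsQuote := value.toList.any (fun ch => PySem.Str.isspace ch) || PySem.Str.isIn "#" value
    if needsQuote then
      let escaped := PySem.Str.replace value "\"" "\\\""
      key ++ "=\"" ++ escaped ++ "\""
    else key ++ "=" ++ value

-- the 'if header: …' prologue (identical in both Pythons)
def headerLines (header : Option String) : List String :=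
  match header with
  | none => []
  | some h =>
      if h = "" then []
      else (PySem.Str.splitlines h).map (fun hl => PySem.Str.rstrip ("# " ++ hl)) ++ [""]

-- body of A's 'for title, keys in groups' loop
def aStep (values : List (String × String)) (st : List String × PySem.Set String)
    (g : String × List String) : List String × PySem.Set String :=
  let d := PySem.Dict.mk values
  let present := (g.2.filter (fun k => d.contains k && (d.getD k "" != ""))).map
      (fun k => (k, d.getD k ""))
  if present = [] then st
  else
    let st1 := (st.1 ++ ["# --- " ++ g.1 ++ " ---"], st.2)
    let st2 := present.foldl
        (fun st kv => (st.1 ++ [renderPair kv.1 kv.2], PySem.Set.add st.2 kv.1)) st1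
    (st2.1 ++ [""], st2.2)

def render_env_text (values : List (String × String)) (header : Option String) : String :=
  let d := PySem.Dict.mk values
  let st := envGroups.foldl (aStep values) (headerLines header, PySem.Set.empty)
  let extras := PySem.List.sorted
      (d.keys.filter (fun k => !(PySem.Set.contains st.2 k) && (d.getD k "" != "")))
      (fun k => k)
  let lines :=
    if extras = [] then st.1
    else st.1 ++ ["# --- Extra ---"] ++ extras.map (fun k => renderPair k (d.getD k "")) ++ [""]
  PySem.Str.rstrip (PySem.Str.join "\n" lines) ++ "\n"

-- ===== PORT B =====
-- _RANK = {k: gi*1000 + pos ...}  (dict comprehension ported as the corresponding fold)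
def envRank : PySem.Dict String Int :=
  (PySem.List.enumerate envGroups).foldl
    (fun r gp => (PySem.List.enumerate gp.2.2).foldl
      (fun r kp => r.insert kp.2 (gp.1 * 1000 + kp.1)) r)
    PySem.Dict.empty
def envExtraRank : Int := (envGroups.length : Int) * 1000
def envTitles : List String := envGroups.map (fun g => g.1) ++ ["Extra"]

-- body of B's emission loop over the sorted entries (state: out, prev)
def bStep (st : List String × Int) (kv : String × String) : List String × Int :=
  let gi := PySem.Int.floordiv (envRank.getD kv.1 envExtraRank) 1000
  let st1 :=
    if gi ≠ st.2 then
      ((if 0 ≤ st.2 then st.1 ++ [""] else st.1) ++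
        ["# --- " ++ PySem.List.pyGetD envTitles gi "" ++ " ---"], gi)
    else st
  (st1.1 ++ [renderPair kv.1 kv.2], st1.2)

def render_env_text_alt (values : List (String × String)) (header : Option String) : String :=
  let d := PySem.Dict.mk values
  let entries := PySem.List.sorted2 (d.items.filter (fun kv => kv.2 != ""))
      (fun kv => envRank.getD kv.1 envExtraRank) (fun kv => kv.1)
  let st := entries.foldl bStep (headerLines header, (-1 : Int))
  PySem.Str.rstrip (PySem.Str.join "\n" st.1) ++ "\n"

-- ===== PRECONDITION & SPEC =====
-- Pre_ excludes association lists with duplicate keys: 'values' models a Python dict,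
-- which cannot contain duplicate keys, so such lists correspond to no dict argument.
def Pre_render_env_text (values : List (String × String)) (header : Option String) : Prop :=
  (values.map (fun kv => kv.1)).Nodup
instance (values : List (String × String)) (header : Option String) :
    Decidable (Pre_render_env_text values header) := by unfold Pre_render_env_text; infer_instance

def pvWitness_render_env_text : (List (String × String)) × Option String :=
  ([("MODEL_ID", "m"), ("ZKEY", "1"), ("TP", "")], some "preset")

def Spec_render_env_text (values : List (String × String)) (header : Option String) (out : String) : Prop := out = render_env_text_alt values header
instance (values : List (String × String)) (header : Option String) (out : String) : Decidable (Spec_render_env_text values header out) := by unfold Spec_render_env_text; infer_instance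

-- ===== CLAIM (what is proved, stated in full; the proofs are below) =====
def Claim_equal_render_env_text : Prop := ∀ (values : List (String × String)) (header : Option String), Dom_render_env_text values header → Pre_render_env_text values header → Spec_render_env_text values header (render_env_text values header)

-- ===== LEMMAS AND PROOFS =====

-- proof-side abbreviations
def rk (k : String) : Int := envRank.getD k envExtraRank
def giOf (k : String) : Int := PySem.Int.floordiv (rk k) 1000
def keyOf (kv : String × String) : Int ×ₗ String := toLex (rk kv.1, kv.1)
def rend (kv : String × String) : String := renderPair kv.1 kv.2
def allKnown : List String := envGroups.flatMap (fun g => g.2)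
def pkB (values : List (String × String)) (k : String) : Bool :=
  (PySem.Dict.mk values).contains k && ((PySem.Dict.mk values).getD k "" != "")
def pres (values : List (String × String)) (ks : List String) : List (String × String) :=
  (ks.filter (pkB values)).map (fun k => (k, (PySem.Dict.mk values).getD k ""))
def exKeys (values : List (String × String)) : List String :=
  PySem.List.sorted
    ((PySem.Dict.mk values).keys.filter
      (fun k => !(decide (k ∈ allKnown)) && ((PySem.Dict.mk values).getD k "" != "")))
    (fun k => k)
def exPairs (values : List (String × String)) : List (String × String) :=
  (exKeys values).map (fun k => (k, (PySem.Dict.mk values).getD k ""))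
def tl (g : Int) : String := "# --- " ++ PySem.List.pyGetD envTitles g "" ++ " ---"
def secOf (values : List (String × String)) (g : String × List String) : List String :=
  if pres values g.2 = [] then []
  else ("# --- " ++ g.1 ++ " ---") :: ((pres values g.2).map rend ++ [""])
def bsOf (values : List (String × String)) : List (Int × List (String × String)) :=
  [(0, pres values keysIdentity), (1, pres values keysRuntime), (2, pres values keysVllm),
   (3, pres values keysSglang), (4, pres values keysBench), (5, exPairs values)]
def Aflat : List (Int × List (String × String)) → List String
  | [] => []
  | b :: bs => (if b.2 = [] then [] else tl b.1 :: (b.2.map rend ++ [""])) ++ Aflat bs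
def Jf : Int → List (Int × List (String × String)) → List String
  | _, [] => []
  | p, b :: bs =>
      if b.2 = [] then Jf p bs
      else ((if 0 ≤ p then [""] else []) ++ tl b.1 :: b.2.map rend) ++ Jf b.1 bs
def finish (ls : List String) : String :=
  PySem.Str.rstrip (PySem.Str.join "\n" ls) ++ "\n"

-- concrete facts about the rank table
set_option maxRecDepth 40000 in
theorem envRank_keys : envRank.keys = allKnown := by decide
set_option maxRecDepth 40000 in
theorem rkFacts :
    ((keysIdentity.map rk).Pairwise (· < ·) ∧ keysIdentity.all (fun k => (giOf k == 0) && (0 ≤ rk k) && (rk k < 1000)) = true) ∧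
    ((keysRuntime.map rk).Pairwise (· < ·) ∧ keysRuntime.all (fun k => (giOf k == 1) && (1000 ≤ rk k) && (rk k < 2000)) = true) ∧
    ((keysVllm.map rk).Pairwise (· < ·) ∧ keysVllm.all (fun k => (giOf k == 2) && (2000 ≤ rk k) && (rk k < 3000)) = true) ∧
    ((keysSglang.map rk).Pairwise (· < ·) ∧ keysSglang.all (fun k => (giOf k == 3) && (3000 ≤ rk k) && (rk k < 4000)) = true) ∧
    ((keysBench.map rk).Pairwise (· < ·) ∧ keysBench.all (fun k => (giOf k == 4) && (4000 ≤ rk k) && (rk k < 5000)) = true) := by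
  refine ⟨⟨by decide, by decide⟩, ⟨by decide, by decide⟩, ⟨by decide, by decide⟩,
    ⟨by decide, by decide⟩, ⟨by decide, by decide⟩⟩

theorem rk_unknown {k : String} (h : k ∉ allKnown) : rk k = 5000 := by
  have hc : envRank.contains k = false := by
    rw [PySem.Dict.contains_eq_decide_mem_keys, envRank_keys]
    simpa using h
  have : rk k = envExtraRank := PySem.Dict.getD_of_not_contains envRank envExtraRank hc
  simpa [envExtraRank, envGroups] using this

theorem gi_unknown {k : String} (h : k ∉ allKnown) : giOf k = 5 := by
  simp only [giOf, rk_unknown h]; decide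

-- finish swallows one trailing blank line
theorem chars_join_append_nil (sep : List Char) :
    ∀ xs : List (List Char),
      PySem.Chars.join sep (xs ++ [[]])
        = PySem.Chars.join sep xs ++ (if xs = [] then [] else sep)
  | [] => by simp [PySem.Chars.join_nil, PySem.Chars.join_singleton]
  | [a] => by
      simp only [List.cons_append, List.nil_append, PySem.Chars.join_cons_cons,
        PySem.Chars.join_singleton]
      simp
  | a :: b :: t => by
      have ih := chars_join_append_nil sep (b :: t)
      simp only [List.cons_append, PySem.Chars.join_cons_cons] at ih ⊢
      simp [ih]

theorem join_append_blank (ls : List String) :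
    (PySem.Str.join "\n" (ls ++ [""])).toList
      = (PySem.Str.join "\n" ls).toList ++ (if ls = [] then [] else ['\n']) := by
  simp only [PySem.Str.toList_join, List.map_append, List.map]
  have h := chars_join_append_nil "\n".toList (ls.map String.toList)
  rw [show ("".toList) = ([] : List Char) from rfl, h]
  by_cases he : ls = [] <;> simp [he]

theorem rstrip_newline (cs : List Char) :
    PySem.Chars.rstrip (cs ++ ['\n']) = PySem.Chars.rstrip cs := by
  simp [PySem.Chars.rstrip, List.reverse_append]
  rfl

theorem finish_blank (ls : List String) : finish (ls ++ [""]) = finish ls := by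
  unfold finish
  congr 1
  simp only [PySem.Str.rstrip]
  congr 1
  rw [join_append_blank]
  by_cases h : ls = [] <;> simp [h, rstrip_newline]

theorem AJ' (bs : List (Int × List (String × String))) (hge : ∀ b ∈ bs, (0:Int) ≤ b.1) :
    ∀ p : Int, 0 ≤ p → [""] ++ Aflat bs = Jf p bs ++ [""] := by
  induction bs with
  | nil => intro p _; simp [Aflat, Jf]
  | cons b bs ih =>
    intro p hp
    have hb := hge b (by simp)
    have hge' : ∀ b' ∈ bs, (0:Int) ≤ b'.1 := fun b' hb' => hge b' (by simp [hb'])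
    by_cases h2 : b.2 = []
    · simp [Aflat, Jf, h2, ih hge' p hp]
    · have h := ih hge' b.1 hb
      simp only [Aflat, Jf, if_neg h2, if_pos hp, List.cons_append, List.append_assoc,
        List.nil_append]
      simp only [List.singleton_append] at h
      rw [← h]

-- title literals
theorem tl_lit : tl 0 = "# --- " ++ "Identity" ++ " ---" ∧ tl 1 = "# --- " ++ "Runtime" ++ " ---"
    ∧ tl 2 = "# --- " ++ "vLLM" ++ " ---" ∧ tl 3 = "# --- " ++ "SGLang" ++ " ---"
    ∧ tl 4 = "# --- " ++ "Bench" ++ " ---" ∧ tl 5 = "# --- Extra ---" := by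
  refine ⟨by decide, by decide, by decide, by decide, by decide, by decide⟩

theorem pkB_def (values : List (String × String)) :
    pkB values = fun k => (PySem.Dict.mk values).contains k
      && ((PySem.Dict.mk values).getD k "" != "") := rfl
theorem rend_def : rend = fun kv => renderPair kv.1 kv.2 := rfl

theorem aFold (values : List (String × String)) (gs : List (String × List String)) :
    ∀ (ls : List String) (s : PySem.Set String),
      gs.foldl (aStep values) (ls, s)
        = (ls ++ (gs.map (secOf values)).flatten,
           s.update (gs.flatMap (fun g => g.2.filter (pkB values)))) := by
  induction gs with
  | nil => intro ls s; simp [PySem.Set.update_nil]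
  | cons g gs ih =>
    intro ls s
    rw [List.foldl_cons]
    by_cases hp : pres values g.2 = []
    · have hf : g.2.filter (pkB values) = [] := by
        simpa [pres, List.map_eq_nil_iff] using hp
      have hstep : aStep values (ls, s) g = (ls, s) := by
        simp only [aStep]
        rw [if_pos (by simpa [pres, pkB] using hp)]
      rw [hstep, ih ls s]
      simp [secOf, hp, hf]
    · have hstep : aStep values (ls, s) g
          = (ls ++ secOf values g, s.update (g.2.filter (pkB values))) := by
        simp only [aStep]
        rw [if_neg (by simpa [pres, pkB] using hp)]
        rw [PySem.List.foldl_prod_mk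
              (f := fun (l : List String) (kv : String × String) => l ++ [renderPair kv.1 kv.2])
              (g := fun (s : PySem.Set String) (kv : String × String) => PySem.Set.add s kv.1)]
        rw [PySem.List.foldl_append_singleton_eq_map,
           ← PySem.Set.update_map_eq_foldl_add _ (fun (kv : String × String) => kv.1) s]
        have hm : ((g.2.filter (fun k => (PySem.Dict.mk values).contains k
              && ((PySem.Dict.mk values).getD k "" != ""))).map
                (fun k => (k, (PySem.Dict.mk values).getD k ""))).map (fun kv => kv.1)
            = g.2.filter (pkB values) := by
          simp [List.map_map, Function.comp_def, pkB_def]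
        rw [hm]
        have hsec : secOf values g = ("# --- " ++ g.1 ++ " ---")
            :: ((pres values g.2).map rend ++ [""]) := by
          simp [secOf, hp]
        simp [hsec, pres, pkB_def, rend_def, List.append_assoc]
      rw [hstep, ih]
      simp [PySem.Set.update_append, List.append_assoc]

theorem exKeys_eq (values : List (String × String)) :
    PySem.List.sorted ((PySem.Dict.mk values).keys.filter
        (fun k => !(decide (k ∈ allKnown)) && ((PySem.Dict.mk values).getD k "" != "")))
      (fun k => k) = exKeys values := rfl

theorem A_eq (values : List (String × String)) (header : Option String)
    (hnd : (values.map (fun kv => kv.1)).Nodup) :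
    render_env_text values header = finish (headerLines header ++ Aflat (bsOf values)) := by
  have hndk : (PySem.Dict.mk values).keys.Nodup := by
    simpa [PySem.Dict.keys_mk] using hnd
  simp only [render_env_text]
  rw [aFold values envGroups (headerLines header) PySem.Set.empty]
  rw [PySem.Set.update_empty]
  -- rewrite the 'seen'-based extras filter into the allKnown-based one
  have hfilt : (PySem.Dict.mk values).keys.filter
        (fun k => !(PySem.Set.contains (PySem.Set.ofList
            (envGroups.flatMap (fun g => g.2.filter (pkB values)))) k)
          && ((PySem.Dict.mk values).getD k "" != ""))
      = (PySem.Dict.mk values).keys.filter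
        (fun k => !(decide (k ∈ allKnown)) && ((PySem.Dict.mk values).getD k "" != "")) := by
    apply List.filter_congr
    intro k hk
    by_cases hx : ((PySem.Dict.mk values).getD k "" != "") = true
    · have hcd : (PySem.Dict.mk values).contains k = true := by
        rw [PySem.Dict.contains_eq_decide_mem_keys]
        simpa using hk
      have hmem : k ∈ PySem.Set.ofList (envGroups.flatMap (fun g => g.2.filter (pkB values)))
          ↔ k ∈ allKnown := by
        rw [PySem.Set.mem_ofList]
        simp only [List.mem_flatMap, List.mem_filter, allKnown]
        constructor
        · rintro ⟨g, hg, hkg, _⟩; exact ⟨g, hg, hkg⟩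
        · rintro ⟨g, hg, hkg⟩
          exact ⟨g, hg, hkg, by simp [pkB, hcd, hx]⟩
      have : PySem.Set.contains (PySem.Set.ofList
            (envGroups.flatMap (fun g => g.2.filter (pkB values)))) k
          = decide (k ∈ allKnown) := by
        rcases Bool.dichotomy (decide (k ∈ allKnown)) with hd | hd
        · rw [hd]
          simp only [Bool.eq_false_iff, ne_eq, PySem.Set.contains_iff]
          rw [hmem]
          simpa using hd
        · rw [hd, PySem.Set.contains_iff, hmem]
          simpa using hd
      rw [this]
    · simp only [Bool.not_eq_true] at hx
      simp [hx]
  rw [hfilt]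
  have hAflat : Aflat (bsOf values)
      = (envGroups.map (secOf values)).flatten
        ++ (if exKeys values = [] then []
            else "# --- Extra ---"
              :: ((exKeys values).map (fun k => renderPair k ((PySem.Dict.mk values).getD k ""))
                  ++ [""])) := by
    have hex : exPairs values = [] ↔ exKeys values = [] := by
      simp [exPairs]
    obtain ⟨t0, t1, t2, t3, t4, t5⟩ := tl_lit
    by_cases he : exKeys values = []
    · simp [bsOf, Aflat, envGroups, secOf, t0, t1, t2, t3, t4, he, exPairs]
    · simp [bsOf, Aflat, envGroups, secOf, t0, t1, t2, t3, t4, t5, he,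
        exPairs, rend,
        List.map_map, Function.comp]
  rw [exKeys_eq, hAflat]
  show _ = finish _
  unfold finish
  by_cases he : exKeys values = [] <;> simp [he, List.append_assoc]

-- Python's tuple sort key (r, k) is the lexicographic order on Int × String
theorem sorted2_lex {α : Type} (xs : List α) (k1 : α → Int) (k2 : α → String) :
    PySem.List.sorted2 xs k1 k2
      = PySem.List.sorted xs (fun x => (toLex (k1 x, k2 x) : Int ×ₗ String)) := by
  simp only [PySem.List.sorted2, PySem.List.sorted, Bool.false_eq_true, if_false]
  have hb : (fun a b => decide (k1 a < k1 b) || (!decide (k1 b < k1 a) && decide (k2 a < k2 b)))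
      = fun a b => decide ((toLex (k1 a, k2 a) : Int ×ₗ String) < toLex (k1 b, k2 b)) := by
    funext a b
    rcases lt_trichotomy (k1 a) (k1 b) with h | h | h
    · simp [h, Prod.Lex.lt_iff]
    · simp [h, Prod.Lex.lt_iff]
    · simp [h, h.ne', Prod.Lex.lt_iff, lt_asymm h]
  rw [hb]

theorem keyOf_lt_left {a b : String × String} (h : rk a.1 < rk b.1) : keyOf a < keyOf b := by
  simp only [keyOf, Prod.Lex.lt_iff, ofLex_toLex]
  exact Or.inl h

theorem groupFacts {ks : List String} {i lo hi : Int}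
    (h : ks.all (fun k => (giOf k == i) && (lo ≤ rk k) && (rk k < hi)) = true) :
    ∀ k ∈ ks, giOf k = i ∧ lo ≤ rk k ∧ rk k < hi := by
  intro k hk
  have := List.all_eq_true.mp h k hk
  simpa [and_assoc] using this

theorem presMem (values : List (String × String)) (ks : List String) (kv : String × String) :
    kv ∈ pres values ks
      ↔ kv.1 ∈ ks ∧ pkB values kv.1 = true ∧ kv.2 = (PySem.Dict.mk values).getD kv.1 "" := by
  rcases kv with ⟨k, v⟩
  simp only [pres, List.mem_map, List.mem_filter]
  constructor
  · rintro ⟨a, ⟨ha, hpk⟩, heq⟩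
    obtain ⟨rfl, rfl⟩ := Prod.mk.injEq .. ▸ heq
    exact ⟨ha, hpk, rfl⟩
  · rintro ⟨ha, hpk, rfl⟩
    exact ⟨k, ⟨ha, hpk⟩, rfl⟩

theorem exKeysMem (values : List (String × String)) (k : String) :
    k ∈ exKeys values ↔ k ∈ (PySem.Dict.mk values).keys ∧ k ∉ allKnown
      ∧ ((PySem.Dict.mk values).getD k "" != "") = true := by
  unfold exKeys
  rw [(PySem.List.sorted_perm _ _ _).mem_iff, List.mem_filter]
  simp

theorem exPairsMem (values : List (String × String)) (kv : String × String) :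
    kv ∈ exPairs values
      ↔ kv.1 ∈ exKeys values ∧ kv.2 = (PySem.Dict.mk values).getD kv.1 "" := by
  rcases kv with ⟨k, v⟩
  simp only [exPairs, List.mem_map]
  constructor
  · rintro ⟨a, ha, heq⟩
    obtain ⟨rfl, rfl⟩ := Prod.mk.injEq .. ▸ heq
    exact ⟨ha, rfl⟩
  · rintro ⟨ha, rfl⟩
    exact ⟨k, ha, rfl⟩

-- dict facts under Nodup keys
theorem mem_values_iff (values : List (String × String))
    (hnd : (values.map (fun kv => kv.1)).Nodup) (k : String) (v : String) :
    (k, v) ∈ values ↔ (PySem.Dict.mk values).get? k = some v := by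
  have hndk : (PySem.Dict.mk values).keys.Nodup := by
    simpa [PySem.Dict.keys_mk] using hnd
  rw [PySem.Dict.get?_eq_some_iff_mem_items _ _ _ hndk]

theorem pkB_of_get? {values : List (String × String)} {k v : String}
    (h : (PySem.Dict.mk values).get? k = some v) :
    (PySem.Dict.mk values).getD k "" = v ∧ pkB values k = (v != "") := by
  have hgd := PySem.Dict.getD_of_get?_eq_some (PySem.Dict.mk values) "" h
  have hc : (PySem.Dict.mk values).contains k = true := by
    rw [PySem.Dict.contains_eq_isSome_get?, h]; rfl
  refine ⟨hgd, ?_⟩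
  simp [pkB, hc, hgd]

theorem mem_flattenBlocks (values : List (String × String))
    (hnd : (values.map (fun kv => kv.1)).Nodup) (kv : String × String) :
    kv ∈ ((bsOf values).map Prod.snd).flatten
      ↔ kv ∈ values.filter (fun kv => kv.2 != "") := by
  rcases kv with ⟨k, v⟩
  rw [List.mem_filter]
  constructor
  · intro h
    simp only [bsOf, List.map_cons, List.map_nil, List.flatten_cons, List.flatten_nil,
      List.mem_append, List.append_nil, List.mem_append] at h
    have hpres : ∀ ks : List String, (k, v) ∈ pres values ks
        → (k, v) ∈ values ∧ (v != "") = true := by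
      intro ks hm
      rw [presMem] at hm
      obtain ⟨_, hpk, hv⟩ := hm
      simp only [pkB] at hpk
      obtain ⟨hc, hne⟩ := Bool.and_eq_true_iff.mp hpk
      have hsome : ((PySem.Dict.mk values).get? k).isSome = true := by
        rw [← PySem.Dict.contains_eq_isSome_get?]; exact hc
      obtain ⟨v', hv'⟩ := Option.isSome_iff_exists.mp hsome
      obtain ⟨hgd, _⟩ := pkB_of_get? hv'
      simp only at hv
      subst hv
      refine ⟨(mem_values_iff values hnd k _).mpr (by rw [hgd]; exact hv'), by simpa [hgd] using hne⟩
    rcases h with h | h | h | h | h | h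
    · exact hpres _ h
    · exact hpres _ h
    · exact hpres _ h
    · exact hpres _ h
    · exact hpres _ h
    · rw [exPairsMem] at h
      obtain ⟨hk, hv⟩ := h
      rw [exKeysMem] at hk
      obtain ⟨hkeys, _, hne⟩ := hk
      have hsome : ((PySem.Dict.mk values).get? k).isSome = true := by
        rw [← PySem.Dict.contains_eq_isSome_get?, PySem.Dict.contains_eq_decide_mem_keys]
        simpa using hkeys
      obtain ⟨v', hv'⟩ := Option.isSome_iff_exists.mp hsome
      obtain ⟨hgd, _⟩ := pkB_of_get? hv'
      simp only at hv
      subst hv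
      refine ⟨(mem_values_iff values hnd k _).mpr (by rw [hgd]; exact hv'), by simpa [hgd] using hne⟩
  · rintro ⟨hmem, hne⟩
    have hget : (PySem.Dict.mk values).get? k = some v := (mem_values_iff values hnd k v).mp hmem
    obtain ⟨hgd, hpkv⟩ := pkB_of_get? hget
    have hpk : pkB values k = true := by rw [hpkv]; exact hne
    have hkeys : k ∈ (PySem.Dict.mk values).keys := by
      rw [PySem.Dict.keys_mk]
      exact List.mem_map_of_mem hmem
    simp only [bsOf, List.map_cons, List.map_nil, List.flatten_cons, List.flatten_nil,
      List.mem_append, List.append_nil]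
    by_cases hknown : k ∈ allKnown
    · have : k ∈ keysIdentity ∨ k ∈ keysRuntime ∨ k ∈ keysVllm ∨ k ∈ keysSglang
          ∨ k ∈ keysBench := by
        simpa [allKnown, envGroups] using hknown
      have hin : ∀ ks : List String, k ∈ ks → (k, v) ∈ pres values ks := by
        intro ks hks
        rw [presMem]
        exact ⟨hks, hpk, hgd.symm⟩
      rcases this with h | h | h | h | h
      · exact Or.inl (hin _ h)
      · exact Or.inr (Or.inl (hin _ h))
      · exact Or.inr (Or.inr (Or.inl (hin _ h)))
      · exact Or.inr (Or.inr (Or.inr (Or.inl (hin _ h))))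
      · exact Or.inr (Or.inr (Or.inr (Or.inr (Or.inl (hin _ h)))))
    · refine Or.inr (Or.inr (Or.inr (Or.inr (Or.inr ?_))))
      rw [exPairsMem, exKeysMem]
      exact ⟨⟨hkeys, hknown, by simpa [hgd] using hne⟩, hgd.symm⟩

theorem presPairwiseKey (values : List (String × String)) {ks : List String}
    (hks : (ks.map rk).Pairwise (· < ·)) :
    (pres values ks).Pairwise (fun a b => keyOf a < keyOf b) := by
  unfold pres
  rw [List.pairwise_map]
  have h1 : ks.Pairwise (fun a b => rk a < rk b) := (List.pairwise_map).mp hks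
  have h2 : (List.filter (pkB values) ks).Pairwise (fun a b => rk a < rk b) :=
    List.Pairwise.sublist List.filter_sublist h1
  exact h2.imp (fun h => keyOf_lt_left h)

theorem exPairsPairwiseKey (values : List (String × String))
    (hnd : (values.map (fun kv => kv.1)).Nodup) :
    (exPairs values).Pairwise (fun a b => keyOf a < keyOf b) := by
  have hnodup : (exKeys values).Nodup := by
    unfold exKeys
    rw [(PySem.List.sorted_perm _ _ _).nodup_iff]
    refine List.Nodup.filter _ ?_
    simpa [PySem.Dict.keys_mk] using hnd
  have hle : (exKeys values).Pairwise (fun a b => a ≤ b) :=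
    PySem.List.sorted_pairwise _ (fun k => k)
  have hlt : (exKeys values).Pairwise (fun a b => a < b) :=
    (hle.and hnodup).imp (fun h => lt_of_le_of_ne h.1 h.2)
  unfold exPairs
  rw [List.pairwise_map]
  refine hlt.imp_of_mem ?_
  intro a b ha hb hab
  have hra : rk a = 5000 := rk_unknown ((exKeysMem values a).mp ha).2.1
  have hrb : rk b = 5000 := rk_unknown ((exKeysMem values b).mp hb).2.1
  simp only [keyOf, Prod.Lex.lt_iff, ofLex_toLex]
  exact Or.inr ⟨by rw [hra, hrb], hab⟩

theorem pairwiseBlocks (values : List (String × String))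
    (hnd : (values.map (fun kv => kv.1)).Nodup) :
    (((bsOf values).map Prod.snd).flatten).Pairwise (fun a b => keyOf a < keyOf b) := by
  obtain ⟨⟨pw0, f0⟩, ⟨pw1, f1⟩, ⟨pw2, f2⟩, ⟨pw3, f3⟩, ⟨pw4, f4⟩⟩ := rkFacts
  have g0 := groupFacts f0; have g1 := groupFacts f1; have g2 := groupFacts f2
  have g3 := groupFacts f3; have g4 := groupFacts f4
  have bnd : ∀ (ks : List String) (i lo hi : Int), (∀ k ∈ ks, giOf k = i ∧ lo ≤ rk k ∧ rk k < hi)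
      → ∀ kv ∈ pres values ks, lo ≤ rk kv.1 ∧ rk kv.1 < hi := by
    intro ks i lo hi h kv hkv
    have := ((presMem values ks kv).mp hkv).1
    exact (h _ this).2
  have b0 := bnd _ _ _ _ g0; have b1 := bnd _ _ _ _ g1; have b2 := bnd _ _ _ _ g2
  have b3 := bnd _ _ _ _ g3; have b4 := bnd _ _ _ _ g4
  have bex : ∀ kv ∈ exPairs values, rk kv.1 = 5000 := by
    intro kv hkv
    exact rk_unknown ((exKeysMem values kv.1).mp ((exPairsMem values kv).mp hkv).1).2.1
  simp only [bsOf, List.map_cons, List.map_nil, List.flatten_cons, List.flatten_nil,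
    List.append_nil]
  have cross : ∀ (l1 l2 : List (String × String)) (m : Int),
      (∀ kv ∈ l1, rk kv.1 < m) → (∀ kv ∈ l2, m ≤ rk kv.1) →
      ∀ a ∈ l1, ∀ b ∈ l2, keyOf a < keyOf b := by
    intro l1 l2 m h1 h2 a ha b hb
    exact keyOf_lt_left (lt_of_lt_of_le (h1 a ha) (h2 b hb))
  rw [List.pairwise_append]
  refine ⟨presPairwiseKey values pw0, ?_, ?_⟩
  · rw [List.pairwise_append]
    refine ⟨presPairwiseKey values pw1, ?_, ?_⟩
    · rw [List.pairwise_append]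
      refine ⟨presPairwiseKey values pw2, ?_, ?_⟩
      · rw [List.pairwise_append]
        refine ⟨presPairwiseKey values pw3, ?_, ?_⟩
        · rw [List.pairwise_append]
          refine ⟨presPairwiseKey values pw4, exPairsPairwiseKey values hnd, ?_⟩
          · exact cross _ _ 5000 (fun kv h => (b4 kv h).2) (fun kv h => le_of_eq (bex kv h).symm)
        · intro a ha b hb
          refine cross _ _ 4000 (fun kv h => (b3 kv h).2) ?_ a ha b hb
          intro kv h
          rcases List.mem_append.mp h with h | h
          · exact (b4 kv h).1
          · rw [bex kv h]; norm_num
      · intro a ha b hb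
        refine cross _ _ 3000 (fun kv h => (b2 kv h).2) ?_ a ha b hb
        intro kv h
        rcases List.mem_append.mp h with h | h
        · exact le_trans (by norm_num) (b3 kv h).1
        rcases List.mem_append.mp h with h | h
        · exact le_trans (by norm_num) (b4 kv h).1
        · rw [bex kv h]; norm_num
    · intro a ha b hb
      refine cross _ _ 2000 (fun kv h => (b1 kv h).2) ?_ a ha b hb
      intro kv h
      rcases List.mem_append.mp h with h | h
      · exact le_trans (by norm_num) (b2 kv h).1
      rcases List.mem_append.mp h with h | h
      · exact le_trans (by norm_num) (b3 kv h).1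
      rcases List.mem_append.mp h with h | h
      · exact le_trans (by norm_num) (b4 kv h).1
      · rw [bex kv h]; norm_num
  · intro a ha b hb
    refine cross _ _ 1000 (fun kv h => (b0 kv h).2) ?_ a ha b hb
    intro kv h
    rcases List.mem_append.mp h with h | h
    · exact le_trans (by norm_num) (b1 kv h).1
    rcases List.mem_append.mp h with h | h
    · exact le_trans (by norm_num) (b2 kv h).1
    rcases List.mem_append.mp h with h | h
    · exact le_trans (by norm_num) (b3 kv h).1
    rcases List.mem_append.mp h with h | h
    · exact le_trans (by norm_num) (b4 kv h).1
    · rw [bex kv h]; norm_num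

theorem permBlocks (values : List (String × String))
    (hnd : (values.map (fun kv => kv.1)).Nodup) :
    (((bsOf values).map Prod.snd).flatten).Perm
      (values.filter (fun kv => kv.2 != "")) := by
  rw [List.perm_ext_iff_of_nodup ?nd1 ?nd2]
  case nd1 =>
    exact (pairwiseBlocks values hnd).imp (fun {a b} h => by
      intro he; subst he; exact lt_irrefl _ h)
  case nd2 =>
    exact (List.Nodup.of_map _ hnd).filter _
  intro kv
  exact mem_flattenBlocks values hnd kv

theorem giBlocks (values : List (String × String)) :
    ∀ b ∈ bsOf values, ∀ kv ∈ b.2, giOf kv.1 = b.1 := by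
  obtain ⟨⟨_, f0⟩, ⟨_, f1⟩, ⟨_, f2⟩, ⟨_, f3⟩, ⟨_, f4⟩⟩ := rkFacts
  have hpres : ∀ (ks : List String) (i lo hi : Int),
      (∀ k ∈ ks, giOf k = i ∧ lo ≤ rk k ∧ rk k < hi) →
      ∀ kv ∈ pres values ks, giOf kv.1 = i := by
    intro ks i lo hi h kv hkv
    exact (h _ ((presMem values ks kv).mp hkv).1).1
  intro b hb kv hkv
  simp only [bsOf, List.mem_cons] at hb
  rcases hb with rfl | rfl | rfl | rfl | rfl | rfl | h
  · exact hpres _ _ _ _ (groupFacts f0) kv hkv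
  · exact hpres _ _ _ _ (groupFacts f1) kv hkv
  · exact hpres _ _ _ _ (groupFacts f2) kv hkv
  · exact hpres _ _ _ _ (groupFacts f3) kv hkv
  · exact hpres _ _ _ _ (groupFacts f4) kv hkv
  · exact gi_unknown ((exKeysMem values kv.1).mp ((exPairsMem values kv).mp hkv).1).2.1
  · exact absurd h (by simp)

theorem chunkSame (ps : List (String × String)) : ∀ (out : List String) (g : Int),
    (∀ kv ∈ ps, giOf kv.1 = g) → ps.foldl bStep (out, g) = (out ++ ps.map rend, g) := by
  induction ps with
  | nil => intro out g _; simp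
  | cons kv t ih =>
    intro out g h
    have hg : giOf kv.1 = g := h kv (by simp)
    rw [List.foldl_cons]
    have hstep : bStep (out, g) kv = (out ++ [rend kv], g) := by
      simp only [bStep]
      rw [show PySem.Int.floordiv (envRank.getD kv.1 envExtraRank) 1000 = giOf kv.1 from rfl,
        hg]
      simp [rend_def]
    rw [hstep, ih (out ++ [rend kv]) g (fun kv' h' => h kv' (by simp [h']))]
    simp

theorem emitFold (bs : List (Int × List (String × String))) : ∀ (out : List String) (p : Int),
    (∀ b ∈ bs, p < b.1) → ((bs.map Prod.fst).Pairwise (· < ·)) →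
    (∀ b ∈ bs, ∀ kv ∈ b.2, giOf kv.1 = b.1) →
    ∃ q, ((bs.map Prod.snd).flatten).foldl bStep (out, p) = (out ++ Jf p bs, q) := by
  induction bs with
  | nil => intro out p _ _ _; exact ⟨p, by simp [Jf]⟩
  | cons b bs ih =>
    intro out p hlt hpw hgi
    have hpw' : (bs.map Prod.fst).Pairwise (· < ·) :=
      (List.pairwise_cons.mp (by simpa using hpw)).2
    have hhd : ∀ b' ∈ bs, b.1 < b'.1 := by
      intro b' hb'
      exact (List.pairwise_cons.mp (by simpa using hpw)).1 b'.1 (List.mem_map_of_mem hb')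
    have hgi' : ∀ b' ∈ bs, ∀ kv ∈ b'.2, giOf kv.1 = b'.1 :=
      fun b' hb' => hgi b' (by simp [hb'])
    cases hb2 : b.2 with
    | nil =>
      simp only [List.map_cons, List.flatten_cons, hb2, List.nil_append]
      obtain ⟨q, hq⟩ := ih out p (fun b' hb' => lt_trans (hlt b (by simp)) (hhd b' hb'))
        hpw' hgi'
      exact ⟨q, by rw [hq]; simp [Jf, hb2]⟩
    | cons kv tkv =>
      have hgib : ∀ kv' ∈ b.2, giOf kv'.1 = b.1 := hgi b (by simp)
      have hg : giOf kv.1 = b.1 := hgib kv (by simp [hb2])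
      have hne : giOf kv.1 ≠ p := by rw [hg]; exact (ne_of_gt (hlt b (by simp)))
      simp only [List.map_cons, List.flatten_cons, hb2]
      rw [List.foldl_append, List.foldl_cons]
      have hstep : bStep (out, p) kv
          = ((out ++ (if 0 ≤ p then [""] else []) ++ [tl b.1]) ++ [rend kv], b.1) := by
        simp only [bStep]
        rw [show PySem.Int.floordiv (envRank.getD kv.1 envExtraRank) 1000 = giOf kv.1 from rfl,
          hg, if_pos (show b.1 ≠ p from hg ▸ hne)]
        by_cases hp : 0 ≤ p <;> simp [hp, tl, rend_def]
      rw [hstep]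
      rw [chunkSame tkv _ b.1 (fun kv' h' => hgib kv' (by simp [hb2, h']))]
      obtain ⟨q, hq⟩ := ih (out ++ (if 0 ≤ p then [""] else []) ++ [tl b.1]
          ++ [rend kv] ++ tkv.map rend) b.1 hhd hpw' hgi'
      refine ⟨q, ?_⟩
      simp only [List.append_assoc] at hq ⊢
      rw [hq]
      simp [Jf, hb2, List.append_assoc]

theorem B_eq (values : List (String × String)) (header : Option String)
    (hnd : (values.map (fun kv => kv.1)).Nodup) :
    render_env_text_alt values header = finish (headerLines header ++ Jf (-1) (bsOf values)) := by
  simp only [render_env_text_alt]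
  rw [sorted2_lex]
  rw [PySem.List.sorted_eq_of_perm_of_pairwise_lt _ (((bsOf values).map Prod.snd).flatten)
      (fun kv => (toLex (envRank.getD kv.1 envExtraRank, kv.1) : Int ×ₗ String))
      (permBlocks values hnd) (pairwiseBlocks values hnd)]
  obtain ⟨q, hq⟩ := emitFold (bsOf values) (headerLines header) (-1)
    (by intro b hb; simp only [bsOf, List.mem_cons] at hb
        rcases hb with rfl | rfl | rfl | rfl | rfl | rfl | h
        · norm_num
        · norm_num
        · norm_num
        · norm_num
        · norm_num
        · norm_num
        · exact absurd h (by simp))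
    (by simp only [bsOf, List.map_cons, List.map_nil]
        norm_num [List.pairwise_cons])
    (giBlocks values)
  rw [hq]
  rfl

theorem AJtop (bs : List (Int × List (String × String))) (hge : ∀ b ∈ bs, (0:Int) ≤ b.1)
    (H : List String) : finish (H ++ Aflat bs) = finish (H ++ Jf (-1) bs) := by
  induction bs with
  | nil => rfl
  | cons b bs ih =>
    have hb := hge b (by simp)
    have hge' : ∀ b' ∈ bs, (0:Int) ≤ b'.1 := fun b' hb' => hge b' (by simp [hb'])
    by_cases h2 : b.2 = []
    · simpa [Aflat, Jf, h2] using ih hge'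
    · have hA : Aflat (b :: bs) = (tl b.1 :: b.2.map rend) ++ ([""] ++ Aflat bs) := by
        simp [Aflat, h2]
      have hJ : Jf (-1) (b :: bs) = (tl b.1 :: b.2.map rend) ++ Jf b.1 bs := by
        simp [Jf, h2]
      rw [hA, hJ, AJ' bs hge' b.1 hb, ← List.append_assoc, ← List.append_assoc,
        ← List.append_assoc, finish_blank]

-- ===== VERDICT (by name: the statement is the Claim_ definition above) =====
theorem render_env_text_spec : Claim_equal_render_env_text := by
  intro values header _hdom hpre
  unfold Spec_render_env_text
  rw [A_eq values header hpre, B_eq values header hpre,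
      AJtop (bsOf values) (by simp [bsOf]) (headerLines header)]
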